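-- pv_equiv track=rewrite | github.com/Revi1337/BaekJoon-Coding-Test | 백준/Gold/17178. 줄서기/줄서기.py | solution
-- ===== SOURCE A (Python) =====
-- from collections import deque
--
-- def solution(N, lines):
--     wait, lines = [], deque([lines[row][col] for row in range(N) for col in range(5)])
--     tmp_lines = [[line.split('-')[0], int(line.split('-')[1])] for line in lines]
--     tmp_lines.sort()
--     slines = []
--     for alpha, num in tmp_lines:
--         num = str(num)
--         slines.append(alpha + '-' + num)
--
--     for curr in slines:
--         if lines and lines[0] == curr:
--             lines.popleft()
--             continue
--         if wait and wait[-1] == curr: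
--             wait.pop()
--             continue
--
--         while lines and lines[0] != curr:
--             wait.append(lines.popleft())
--
--         if not lines or lines[0] != curr:
--             return "BAD"
--         lines.popleft()
--
--     return 'GOOD'
-- ===== SOURCE B (Python) =====
-- def solution(N, lines):
--     flat = [lines[row][col] for row in range(N) for col in range(5)]
--     pairs = sorted((line.split('-')[0], int(line.split('-')[1])) for line in flat)
--     slines = [alpha + '-' + str(num) for alpha, num in pairs]
--     stack, i = [], 0
--     for x in flat:
--         stack.append(x)
--         while stack and i < len(slines) and stack[-1] == slines[i]:
--             stack.pop()
--             i += 1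
--     return 'GOOD' if i == len(slines) else 'BAD'
-- ===== Notes on version B (the rewrite author's own statement) =====
-- stated objective: simpler
-- what changed: Replaces A's three-branch queue+stack simulation (pop queue front / pop stack top / flush-until-match with an inner while and early BAD returns) by the standard single-stack greedy: one pass over the flattened input that pushes each element and pops while the stack top equals the next sorted target, answering GOOD iff all targets were matched.
import Mathlib
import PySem

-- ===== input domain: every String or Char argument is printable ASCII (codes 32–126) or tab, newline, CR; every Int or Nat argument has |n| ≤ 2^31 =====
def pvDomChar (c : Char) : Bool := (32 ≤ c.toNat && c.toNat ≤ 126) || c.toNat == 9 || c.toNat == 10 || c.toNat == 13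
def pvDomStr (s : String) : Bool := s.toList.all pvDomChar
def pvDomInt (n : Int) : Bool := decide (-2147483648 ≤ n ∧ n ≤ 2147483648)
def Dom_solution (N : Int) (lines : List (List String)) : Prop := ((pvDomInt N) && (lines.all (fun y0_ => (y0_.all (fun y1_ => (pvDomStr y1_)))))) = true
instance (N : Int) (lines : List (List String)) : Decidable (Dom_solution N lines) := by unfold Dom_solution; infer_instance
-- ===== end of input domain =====

-- B changes A's queue+stack three-branch simulation into the standard single-stack greedy pass
-- (same sorted target list); return values proved equal on Pre_. Python stacks (append/pop at the
-- right end) are represented with the top at the head of the Lean list.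

-- ===== PORT A =====

-- line.split('-')  (sep ≠ "", so split? is always `some`)
def pvPartsA (line : String) : List String := (PySem.Str.split? line "-").getD []
-- line.split('-')[0]  (always exists; default never used)
def pvAlphaA (line : String) : String := PySem.List.pyGetD (pvPartsA line) 0 ""
-- int(line.split('-')[1])  (IndexError / ValueError excluded by Pre_; defaults never used there)
def pvNumA (line : String) : Int := (PySem.Int.ofStr? (PySem.List.pyGetD (pvPartsA line) 1 "")).getD 0
-- [lines[row][col] for row in range(N) for col in range(5)]  (IndexError excluded by Pre_)
def pvFlatA (N : Int) (lines : List (List String)) : List String :=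
  (PySem.List.pyRange 0 N 1).flatMap (fun row =>
    (PySem.List.pyRange 0 5 1).map (fun col =>
      PySem.List.pyGetD (PySem.List.pyGetD lines row []) col ""))
-- tmp_lines = [[alpha, num] …]; tmp_lines.sort()  (Python list/tuple comparison = lexicographic)
def pvSortedA (N : Int) (lines : List (List String)) : List (String × Int) :=
  PySem.List.sorted2 ((pvFlatA N lines).map (fun line => (pvAlphaA line, pvNumA line)))
    (fun p => p.1) (fun p => p.2)
-- the for-loop building slines by append
def pvSlinesA (N : Int) (lines : List (List String)) : List String :=
  (pvSortedA N lines).foldl (fun acc p => acc ++ [p.1 ++ "-" ++ PySem.Int.toStr p.2]) []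
-- the inner `while lines and lines[0] != curr: wait.append(lines.popleft())`
def pvFlushA : List String → List String → String → List String × List String
  | [], w, _ => ([], w)
  | x :: q, w, c => if x = c then (x :: q, w) else pvFlushA q (x :: w) c
-- the `for curr in slines:` loop (early returns become result values)
def pvLoopA : List String → List String → List String → String
  | [], _, _ => "GOOD"
  | c :: ts, q, w =>
    if q.head? = some c then pvLoopA ts q.tail w
    else if w.head? = some c then pvLoopA ts q w.tail
    else match pvFlushA q w c with
      | ([], _) => "BAD"
      | (x :: q', w') => if x = c then pvLoopA ts q' w' else "BAD"

def solution (N : Int) (lines : List (List String)) : String :=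
  pvLoopA (pvSlinesA N lines) (pvFlatA N lines) []

-- ===== PORT B =====

-- flat = [lines[row][col] for row in range(N) for col in range(5)]: the comprehension is
-- letter-identical in Source A and Source B, so B reuses the helper pvFlatA
-- slines = [alpha + '-' + str(num) for alpha, num in sorted(…)]
def pvSlinesB (N : Int) (lines : List (List String)) : List String :=
  (PySem.List.sorted2
      ((pvFlatA N lines).map (fun line =>
        (PySem.List.pyGetD ((PySem.Str.split? line "-").getD []) 0 "",
         (PySem.Int.ofStr? (PySem.List.pyGetD ((PySem.Str.split? line "-").getD []) 1 "")).getD 0)))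
      (fun p => p.1) (fun p => p.2)).map
    (fun p => p.1 ++ "-" ++ PySem.Int.toStr p.2)
-- the `while stack and i < len(slines) and stack[-1] == slines[i]` pop loop;
-- the index i is represented by the list of still-unmatched targets (second component)
def pvPopB : List String → List String → List String × List String
  | z :: st, c :: ts => if z = c then pvPopB st ts else (z :: st, c :: ts)
  | st, ts => (st, ts)
-- the `for x in flat:` pass; state = (stack, unmatched targets)
def pvRunB (flat : List String) (st : List String × List String) : List String × List String :=
  flat.foldl (fun s x => pvPopB (x :: s.1) s.2) st

def solution_alt (N : Int) (lines : List (List String)) : String :=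
  if (pvRunB (pvFlatA N lines) ([], pvSlinesB N lines)).2 = [] then "GOOD" else "BAD"

-- ===== PRECONDITION & SPEC =====

-- a used string is fine iff it has a '-' and int() accepts the field after the first '-'
def pvLineOk (s : String) : Bool :=
  match ((PySem.Str.split? s "-").getD []).drop 1 with
  | t :: _ => (PySem.Int.ofStr? t).isSome
  | [] => false

-- exactly the inputs where the Python A returns: rows 0..N-1 exist, each has ≥ 5 columns
-- (IndexError otherwise), and each of the 5·N used strings splits into ≥ 2 '-'-fields with an
-- int()-parsable second field (IndexError / ValueError otherwise)
def Pre_solution (N : Int) (lines : List (List String)) : Prop :=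
  N.toNat ≤ lines.length ∧
  ((lines.take N.toNat).all
    (fun row => 5 ≤ row.length && (row.take 5).all pvLineOk)) = true
instance (N : Int) (lines : List (List String)) : Decidable (Pre_solution N lines) := by
  unfold Pre_solution; infer_instance

def pvWitness_solution : Int × List (List String) :=
  (1, [["b-2", "a-1", "a-2", "b-1", "b-10"]])

def Spec_solution (N : Int) (lines : List (List String)) (out : String) : Prop := out = solution_alt N lines
instance (N : Int) (lines : List (List String)) (out : String) : Decidable (Spec_solution N lines out) := by unfold Spec_solution; infer_instance

-- ===== CLAIM (what is proved, stated in full; the proofs are below) =====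
def Claim_equal_solution : Prop := ∀ (N : Int) (lines : List (List String)), Dom_solution N lines → Pre_solution N lines → Spec_solution N lines (solution N lines)

-- ===== LEMMAS AND PROOFS =====

-- "equal values occur consecutively": the key property of the sorted target list
def pvConsec : List String → Prop
  | [] => True
  | c :: ts => pvConsec ts ∧ (c ∈ ts → ts.head? = some c)

def pvOutG (s : List String × List String) : String := if s.2 = [] then "GOOD" else "BAD"




theorem pvPopB_nil_left (ts : List String) : pvPopB [] ts = ([], ts) := by
  cases ts <;> rfl

theorem pvPopB_nil_right (st : List String) : pvPopB st [] = (st, []) := by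
  cases st <;> rfl

theorem pvPopB_cons_ne {z c : String} (st ts : List String) (h : z ≠ c) :
    pvPopB (z :: st) (c :: ts) = (z :: st, c :: ts) := by
  simp [pvPopB, h]

theorem pvPopB_cons_eq (c : String) (st ts : List String) :
    pvPopB (c :: st) (c :: ts) = pvPopB st ts := by
  simp [pvPopB]

theorem pvPopB_lengths (st ts : List String) :
    (pvPopB st ts).1.length + ts.length = (pvPopB st ts).2.length + st.length := by
  induction st generalizing ts with
  | nil => simp [pvPopB_nil_left]
  | cons z st ih =>
    cases ts with
    | nil => simp [pvPopB_nil_right]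
    | cons c ts =>
      by_cases h : z = c
      · subst h; rw [pvPopB_cons_eq]; have := ih ts
        simp only [List.length_cons]; omega
      · rw [pvPopB_cons_ne _ _ h]; simp; omega

theorem pvPopB_mem_right {x : String} (st ts : List String) (h : x ∈ (pvPopB st ts).2) : x ∈ ts := by
  induction st generalizing ts with
  | nil => rwa [pvPopB_nil_left] at h
  | cons z st ih =>
    cases ts with
    | nil => rwa [pvPopB_nil_right] at h
    | cons c ts =>
      by_cases hz : z = c
      · subst hz; rw [pvPopB_cons_eq] at h; exact List.mem_cons_of_mem _ (ih ts h)
      · rwa [pvPopB_cons_ne _ _ hz] at h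

theorem pvPopB_append_garbage {z : String} (u r ts : List String) (hz : z ∉ ts) :
    pvPopB (u ++ z :: r) ts = ((pvPopB u ts).1 ++ z :: r, (pvPopB u ts).2) := by
  induction u generalizing ts with
  | nil =>
    rw [pvPopB_nil_left]
    cases ts with
    | nil => simp [pvPopB_nil_right]
    | cons c ts =>
      have : z ≠ c := by intro h; exact hz (by simp [h])
      simp [pvPopB_cons_ne _ _ this]
  | cons y u ih =>
    cases ts with
    | nil => simp [pvPopB_nil_right]
    | cons c ts =>
      by_cases hy : y = c
      · subst hy
        rw [List.cons_append, pvPopB_cons_eq, pvPopB_cons_eq]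
        exact ih ts (fun h => hz (List.mem_cons_of_mem _ h))
      · rw [List.cons_append, pvPopB_cons_ne _ _ hy, pvPopB_cons_ne _ _ hy]
        simp

theorem pvRunB_cons (x : String) (flat : List String) (s : List String × List String) :
    pvRunB (x :: flat) s = pvRunB flat (pvPopB (x :: s.1) s.2) := rfl

theorem pvRunB_nil (s : List String × List String) : pvRunB [] s = s := rfl

-- garbage on the stack with too few pushes left: the pass cannot finish
theorem pvRunB_garbage_ne {z : String} (q u r ts : List String) (hz : z ∉ ts)
    (hlen : q.length + u.length < ts.length) :
    (pvRunB q (u ++ z :: r, ts)).2 ≠ [] := by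
  induction q generalizing u ts with
  | nil =>
    rw [pvRunB_nil]
    intro h; simp only at h; rw [h] at hlen; simp at hlen
  | cons x q ih =>
    rw [pvRunB_cons]
    show (pvRunB q (pvPopB (x :: (u ++ z :: r)) ts)).2 ≠ []
    rw [show x :: (u ++ z :: r) = (x :: u) ++ z :: r from rfl,
        pvPopB_append_garbage _ _ _ hz]
    have hl := pvPopB_lengths (x :: u) ts
    have hlu : (pvPopB (x :: u) ts).1.length + ts.length
        = (pvPopB (x :: u) ts).2.length + (u.length + 1) := by
      simpa using hl
    apply ih
    · intro h; exact hz (pvPopB_mem_right _ _ h)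
    · simp only [List.length_cons] at hlen; omega



-- pushing elements ≠ c while the next target is c: pure stacking, no pops
theorem pvRunB_stack (pre rest st : List String) (c : String) (ts : List String)
    (h : ∀ x ∈ pre, x ≠ c) :
    pvRunB (pre ++ rest) (st, c :: ts) = pvRunB rest (pre.reverse ++ st, c :: ts) := by
  induction pre generalizing st with
  | nil => simp
  | cons y pre ih =>
    rw [List.cons_append, pvRunB_cons]
    show pvRunB (pre ++ rest) (pvPopB (y :: st) (c :: ts)) = _
    rw [pvPopB_cons_ne _ _ (h y (by simp))]
    rw [ih _ (fun x hx => h x (by simp [hx]))]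
    simp

-- the key lemma: pushing the target c after pre-normalising the stack with pvPopB
theorem pvK (c : String) (w ts2 q : List String)
    (hc : pvConsec (c :: ts2)) (hlen : q.length + w.length = ts2.length) :
    pvOutG (pvRunB q (pvPopB (c :: (pvPopB w (c :: ts2)).1) (pvPopB w (c :: ts2)).2))
      = pvOutG (pvRunB q (pvPopB w ts2)) := by
  induction w generalizing ts2 q with
  | nil =>
    rw [pvPopB_nil_left]
    show pvOutG (pvRunB q (pvPopB (c :: []) (c :: ts2))) = _
    rw [pvPopB_cons_eq, pvPopB_nil_left]
  | cons x w ih =>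
    by_cases hx : x = c
    · subst hx
      rw [pvPopB_cons_eq]
      cases ts2 with
      | nil => simp at hlen
      | cons d ts3 =>
        by_cases hd : d = x
        · subst hd
          rw [pvPopB_cons_eq]
          exact ih ts3 q hc.1 (by simp at hlen; omega)
        · -- d ≠ x(=c): x does not occur in d :: ts3
          have hxnot : x ∉ d :: ts3 := by
            intro hmem
            have := hc.2 hmem
            simp at this; exact hd this
          rw [pvPopB_cons_ne _ _ (fun h => hd h.symm)]
          -- LHS: (u, v) := pvPopB w (d :: ts3); stack c::u, targets v with x=c ∉ v
          have hvmem : x ∉ (pvPopB w (d :: ts3)).2 :=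
            fun h => hxnot (pvPopB_mem_right _ _ h)
          have hlv := pvPopB_lengths w (d :: ts3)
          -- v ≠ [] since |v| = |q| + 1 + |u| > 0
          have hlen' : q.length + (w.length + 1) = ts3.length + 1 := by simpa using hlen
          cases hv : (pvPopB w (d :: ts3)).2 with
          | nil => rw [hv] at hlv; simp at hlv; omega
          | cons e v' =>
            have hvmem' : x ∉ e :: v' := by rw [hv] at hvmem; exact hvmem
            have hce : x ≠ e := by intro h; subst h; exact hvmem' (by simp)
            rw [pvPopB_cons_ne _ _ hce]
            rw [hv] at hlv
            -- both sides BAD by the garbage lemma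
            have h1 : (pvRunB q (x :: (pvPopB w (d :: ts3)).1, e :: v')).2 ≠ [] := by
              have := pvRunB_garbage_ne q [] ((pvPopB w (d :: ts3)).1) (e :: v')
                hvmem' (by simp at hlv ⊢; omega)
              simpa using this
            have h2 : (pvRunB q (x :: w, d :: ts3)).2 ≠ [] := by
              have := pvRunB_garbage_ne q [] w (d :: ts3) hxnot (by simp; omega)
              simpa using this
            simp [pvOutG, h1, h2]
    · rw [pvPopB_cons_ne _ _ hx, pvPopB_cons_eq]


def pvBf (a b : String × Int) : Bool :=
  decide (a.1 < b.1) || (!decide (b.1 < a.1) && decide (a.2 < b.2))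

def pvPLe (a b : String × Int) : Prop := a.1 < b.1 ∨ (a.1 = b.1 ∧ a.2 ≤ b.2)

theorem pvBf_iff (a b : String × Int) :
    pvBf a b = true ↔ (a.1 < b.1 ∨ (¬ b.1 < a.1 ∧ a.2 < b.2)) := by
  unfold pvBf
  rw [Bool.or_eq_true, Bool.and_eq_true, Bool.not_eq_true', decide_eq_true_iff,
    decide_eq_true_iff, decide_eq_false_iff_not]

theorem pvBf_false_imp {a b : String × Int} (h : pvBf b a = false) : pvPLe a b := by
  have h' : ¬ (b.1 < a.1 ∨ (¬ a.1 < b.1 ∧ b.2 < a.2)) := by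
    rw [← pvBf_iff]; simp [h]
  rcases lt_trichotomy a.1 b.1 with hlt | heq | hgt
  · exact Or.inl hlt
  · refine Or.inr ⟨heq, ?_⟩
    by_contra hcon
    exact h' (Or.inr ⟨not_lt.mpr heq.ge, not_le.mp hcon⟩)
  · exact absurd (Or.inl hgt) h' 

theorem pvBf_asymm {a b : String × Int} (h : pvBf a b = true) : pvBf b a = false := by
  rw [pvBf_iff] at h
  rw [← Bool.not_eq_true, pvBf_iff]
  intro hcon
  rcases h with h | ⟨h1, h2⟩ <;> rcases hcon with hc | ⟨hc1, hc2⟩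
  · exact absurd hc (not_lt.mpr h.le)
  · exact hc1 h
  · exact h1 hc
  · exact absurd hc2 (not_lt.mpr h2.le)

theorem pvBf_trans {a b c : String × Int} (h1 : pvBf a b = true) (h2 : pvBf b c = true) :
    pvBf a c = true := by
  rw [pvBf_iff] at *
  rcases h1 with h1 | ⟨h1a, h1b⟩ <;> rcases h2 with h2 | ⟨h2a, h2b⟩
  · exact Or.inl (h1.trans h2)
  · exact Or.inl (lt_of_lt_of_le h1 (not_lt.mp h2a))
  · exact Or.inl (lt_of_le_of_lt (not_lt.mp h1a) h2)
  · exact Or.inr ⟨not_lt.mpr (le_trans (not_lt.mp h1a) (not_lt.mp h2a)), h1b.trans h2b⟩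

theorem pvPLe_antisymm {a b : String × Int} (h1 : pvPLe a b) (h2 : pvPLe b a) : a = b := by
  unfold pvPLe at *
  rcases h1 with h1 | ⟨h1a, h1b⟩ <;> rcases h2 with h2 | ⟨h2a, h2b⟩
  · exact absurd h2 (not_lt.mpr h1.le)
  · exact absurd h1 (by rw [h2a]; exact lt_irrefl _)
  · exact absurd h2 (by rw [h1a]; exact lt_irrefl _)
  · exact Prod.ext h1a (le_antisymm h1b h2b)

theorem pvInsertBy_pairwise (x : String × Int) (l : List (String × Int))
    (hl : l.Pairwise (fun a b => pvBf b a = false)) :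
    (PySem.List.insertBy pvBf x l).Pairwise (fun a b => pvBf b a = false) := by
  induction l with
  | nil => simp [PySem.List.insertBy]
  | cons y ys ih =>
    rw [List.pairwise_cons] at hl
    by_cases hxy : pvBf x y = true
    · rw [PySem.List.insertBy, if_pos hxy]
      refine List.Pairwise.cons ?_ (List.Pairwise.cons hl.1 hl.2)
      intro z hz
      rcases List.mem_cons.mp hz with rfl | hz'
      · exact pvBf_asymm hxy
      · cases hb : pvBf z x with
        | false => rfl
        | true => exact absurd (pvBf_trans hb hxy) (by rw [hl.1 z hz']; simp)
    · rw [PySem.List.insertBy, if_neg hxy]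
      refine List.Pairwise.cons ?_ (ih hl.2)
      intro z hz
      have hmem : z = x ∨ z ∈ ys := by
        have h3 := (PySem.List.mem_insertBy (before := pvBf) (x := x) (ys := ys) (y := z)).mp hz
        tauto
      rcases hmem with rfl | hz'
      · simpa using hxy
      · exact hl.1 z hz'

theorem pvSorted2_pairwise (xs : List (String × Int)) :
    (PySem.List.sorted2 xs (fun p => p.1) (fun p => p.2)).Pairwise pvPLe := by
  have key : ∀ l : List (String × Int), l.Pairwise (fun a b => pvBf b a = false) →
      (xs.foldl (fun acc x => PySem.List.insertBy pvBf x acc) l).Pairwise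
        (fun a b => pvBf b a = false) := by
    induction xs with
    | nil => intro l hl; exact hl
    | cons x xs ih => intro l hl; exact ih _ (pvInsertBy_pairwise x l hl)
  have h2 := key [] (by simp)
  have heq : PySem.List.sorted2 xs (fun p => p.1) (fun p => p.2)
      = xs.foldl (fun acc x => PySem.List.insertBy pvBf x acc) [] := rfl
  rw [heq]
  exact h2.imp (fun h => pvBf_false_imp h)


theorem pvDigitChar_inj {a b : Nat} (ha : a < 10) (hb : b < 10)
    (h : Nat.digitChar a = Nat.digitChar b) : a = b := by
  interval_cases a <;> interval_cases b <;> simp_all [Nat.digitChar]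

theorem pvToDigits_ne_nil (n : Nat) : Nat.toDigits 10 n ≠ [] := by
  have : 0 < (Nat.toDigits 10 n).length := Nat.length_toDigits_pos
  intro h; rw [h] at this; simp at this

theorem pvToDigits_inj : ∀ n m : Nat, Nat.toDigits 10 n = Nat.toDigits 10 m → n = m := by
  intro n
  induction n using Nat.strong_induction_on with
  | _ n ih =>
    intro m h
    rw [Nat.toDigits_eq_if (by norm_num), Nat.toDigits_eq_if (b := 10) (n := m) (by norm_num)] at h
    by_cases hn : n < 10 <;> by_cases hm : m < 10
    · rw [if_pos hn, if_pos hm] at h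
      simp at h
      exact pvDigitChar_inj hn hm h
    · rw [if_pos hn, if_neg hm] at h
      cases hd : Nat.toDigits 10 (m / 10) with
      | nil => exact absurd hd (pvToDigits_ne_nil _)
      | cons y ys =>
        rw [hd] at h
        have := congrArg List.length h
        simp at this
    · rw [if_neg hn, if_pos hm] at h
      cases hd : Nat.toDigits 10 (n / 10) with
      | nil => exact absurd hd (pvToDigits_ne_nil _)
      | cons y ys =>
        rw [hd] at h
        have := congrArg List.length h
        simp at this
    · rw [if_neg hn, if_neg hm] at h
      have h2 := List.append_inj' h (by simp)
      have hpre := h2.1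
      have hlast : Nat.digitChar (n % 10) = Nat.digitChar (m % 10) := by
        have := h2.2; simp at this; exact this
      have hmod : n % 10 = m % 10 :=
        pvDigitChar_inj (Nat.mod_lt _ (by norm_num)) (Nat.mod_lt _ (by norm_num)) hlast
      have hdiv : n / 10 = m / 10 := ih (n / 10) (by omega) _ hpre
      omega

theorem pvToChars_inj {n m : Int} (h : PySem.Int.toChars n = PySem.Int.toChars m) : n = m := by
  unfold PySem.Int.toChars at h
  have hdash : ∀ k : Nat, '-' ∉ Nat.toDigits 10 k := by
    intro k hk
    have := Nat.isDigit_of_mem_toDigits (by norm_num) (by norm_num) hk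
    simp [Char.isDigit] at this
  by_cases hn : n < 0 <;> by_cases hm : m < 0
  · rw [if_pos hn, if_pos hm] at h
    simp at h
    have := pvToDigits_inj _ _ h
    omega
  · rw [if_pos hn, if_neg hm] at h
    exact absurd (h ▸ List.mem_cons_self) (hdash _)
  · rw [if_neg hn, if_pos hm] at h
    exact absurd (h.symm ▸ List.mem_cons_self) (hdash _)
  · rw [if_neg hn, if_neg hm] at h
    have := pvToDigits_inj _ _ h
    omega

-- splitting at the first '-' in a list with dash-free prefixes
theorem pvDashSplit : ∀ (l1 l2 r1 r2 : List Char), '-' ∉ l1 → '-' ∉ l2 →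
    l1 ++ '-' :: r1 = l2 ++ '-' :: r2 → l1 = l2 ∧ r1 = r2 := by
  intro l1
  induction l1 with
  | nil =>
    intro l2 r1 r2 _ h2 h
    cases l2 with
    | nil => simp_all
    | cons y l2 =>
      simp at h
      exact absurd (by rw [← h.1]; exact List.mem_cons_self) h2
  | cons x l1 ih =>
    intro l2 r1 r2 h1 h2 h
    cases l2 with
    | nil =>
      simp at h
      exact absurd (by rw [h.1]; exact List.mem_cons_self) h1
    | cons y l2 =>
      simp at h
      obtain ⟨rfl, h⟩ := h
      have := ih l2 r1 r2 (fun hh => h1 (List.mem_cons_of_mem _ hh))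
        (fun hh => h2 (List.mem_cons_of_mem _ hh)) h
      simp [this]

-- injectivity of  alpha + '-' + str(num)  for dash-free alphas
theorem pvNorm_inj {a1 a2 : String} {n1 n2 : Int}
    (h1 : '-' ∉ a1.toList) (h2 : '-' ∉ a2.toList)
    (h : a1 ++ "-" ++ PySem.Int.toStr n1 = a2 ++ "-" ++ PySem.Int.toStr n2) :
    a1 = a2 ∧ n1 = n2 := by
  have hl := congrArg String.toList h
  rw [String.toList_append, String.toList_append, String.toList_append, String.toList_append,
    PySem.Int.toList_toStr, PySem.Int.toList_toStr] at hl
  have hd : a1.toList ++ '-' :: PySem.Int.toChars n1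
      = a2.toList ++ '-' :: PySem.Int.toChars n2 := by
    simpa using hl
  obtain ⟨ha, hn⟩ := pvDashSplit _ _ _ _ h1 h2 hd
  refine ⟨?_, pvToChars_inj hn⟩
  have := congrArg String.ofList ha
  simpa using this

theorem pvSplitGo_dashfree : ∀ (fuel : Nat) (l cur : List Char) (acc : List (List Char)),
    l.length < fuel → '-' ∉ cur → (∀ p ∈ acc, '-' ∉ p) →
    ∀ p ∈ PySem.Chars.splitOn.go ['-'] fuel l cur acc, '-' ∉ p := by
  intro fuel
  induction fuel with
  | zero => intro l cur acc h; omega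
  | succ f ih =>
    intro l cur acc hlen hcur hacc p hp
    cases l with
    | nil =>
      rw [PySem.Chars.splitOn.go] at hp
      simp at hp
      rcases hp with hp | hp
      · exact hacc p hp
      · rw [hp]; simpa using hcur
      omega
    | cons c rest =>
      rw [PySem.Chars.splitOn.go] at hp
      by_cases hc : c = '-'
      · subst hc
        simp only [List.isPrefixOf_cons₂] at hp
        simp only [show (('-' : Char) == '-') = true from by simp, Bool.true_and] at hp
        have hpre : List.isPrefixOf [] rest = true := by simp
        rw [hpre] at hp
        simp only [if_pos rfl] at hp
        exact ih rest [] (cur.reverse :: acc) (by simp at hlen ⊢; omega) (by simp)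
          (by intro q hq
              rcases List.mem_cons.mp hq with rfl | hq'
              · simpa using hcur
              · exact hacc q hq') p hp
      · have hpre : List.isPrefixOf ['-'] (c :: rest) = false := by
          simp [List.isPrefixOf_cons₂]
          intro hh; exact absurd hh.symm hc
        rw [hpre] at hp
        simp only [Bool.false_eq_true, if_false] at hp
        exact ih rest (c :: cur) acc (by simpa using hlen)
          (by intro hh
              rcases List.mem_cons.mp hh with rfl | hh'
              · exact hc rfl
              · exact hcur hh') hacc p hp

theorem pvSplitOn_dashfree (l : List Char) :
    ∀ p ∈ PySem.Chars.splitOn l ['-'], '-' ∉ p := by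
  unfold PySem.Chars.splitOn
  exact pvSplitGo_dashfree _ l [] [] (by omega) (by simp) (by simp)

-- every part of s.split('-') is dash-free (as a String)
theorem pvSplit_dashfree (s : String) :
    ∀ p ∈ (PySem.Str.split? s "-").getD [], '-' ∉ p.toList := by
  rw [PySem.Str.split?.eq_1]
  intro p hp
  have : PySem.Chars.split? s.toList "-".toList = some (PySem.Chars.splitOn s.toList "-".toList) := by
    unfold PySem.Chars.split?
    simp
  rw [this] at hp
  simp at hp
  obtain ⟨q, hq, rfl⟩ := hp
  have := pvSplitOn_dashfree s.toList q (by simpa using hq)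
  simpa using this

theorem pvFlushA_eq (q : List String) (w : List String) (c : String) :
    pvFlushA q w c
      = (q.dropWhile (fun x => x ≠ c), (q.takeWhile (fun x => x ≠ c)).reverse ++ w) := by
  induction q generalizing w with
  | nil => simp [pvFlushA]
  | cons x q ih =>
    by_cases hx : x = c
    · subst hx; simp [pvFlushA, List.dropWhile_cons, List.takeWhile_cons]
    · simp [pvFlushA, hx, List.dropWhile_cons, List.takeWhile_cons, ih]

theorem pvMainC : (n : Nat) → ∀ ts q w : List String, ts.length ≤ n → pvConsec ts →
    q.length + w.length = ts.length →
    pvLoopA ts q w = pvOutG (pvRunB q (pvPopB w ts)) := by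
  intro n
  induction n with
  | zero =>
    intro ts q w hn _ hlen
    have hts : ts = [] := by cases ts <;> simp_all
    subst hts
    have hq : q = [] := by cases q <;> simp_all
    have hw : w = [] := by cases w <;> simp_all
    subst hq; subst hw
    rfl
  | succ n ih =>
    intro ts q w hn hc hlen
    cases ts with
    | nil =>
      have hq : q = [] := by cases q <;> simp_all
      have hw : w = [] := by cases w <;> simp_all
      subst hq; subst hw; rfl
    | cons c ts2 =>
      simp only [List.length_cons] at hlen hn
      by_cases hb1 : q.head? = some c
      · -- branch 1: queue front matches
        cases q with
        | nil => simp at hb1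
        | cons x q' =>
          simp at hb1; subst hb1
          rw [pvLoopA]
          simp only [List.head?_cons, List.tail_cons]
          rw [pvRunB_cons]
          show pvLoopA ts2 q' w = pvOutG (pvRunB q' (pvPopB (x :: (pvPopB w (x :: ts2)).1) (pvPopB w (x :: ts2)).2))
          rw [pvK x w ts2 q' hc (by simp at hlen; omega)]
          exact ih ts2 q' w (by omega) hc.1 (by simp at hlen; omega)
      · by_cases hb2 : w.head? = some c
        · -- branch 2: stack top matches
          cases w with
          | nil => simp at hb2
          | cons z w2 =>
            simp at hb2; subst hb2
            rw [pvLoopA]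
            simp only [hb1, List.head?_cons, List.tail_cons]
            rw [pvPopB_cons_eq]
            exact ih ts2 q w2 (by omega) hc.1 (by simp at hlen; omega)
        · -- branch 3: flush
          have hpop : pvPopB w (c :: ts2) = (w, c :: ts2) := by
            cases w with
            | nil => exact pvPopB_nil_left _
            | cons z w2 =>
              simp at hb2
              exact pvPopB_cons_ne _ _ hb2
          rw [pvLoopA]
          simp only [hb1, hb2, hpop]
          rw [pvFlushA_eq]
          have hsplit := List.takeWhile_append_dropWhile (p := fun x => x ≠ c) (l := q)
          have htake : ∀ x ∈ q.takeWhile (fun x => x ≠ c), x ≠ c := by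
            intro x hx
            have := List.mem_takeWhile_imp hx
            simpa using this
          cases hdrop : q.dropWhile (fun x => x ≠ c) with
          | nil =>
            -- c not found: A says BAD; B stacks everything and fails
            have hq : q = q.takeWhile (fun x => x ≠ c) := by
              conv_lhs => rw [← hsplit]
              rw [hdrop]
              simp
            have hstack := pvRunB_stack (q.takeWhile (fun x => x ≠ c)) [] w c ts2 htake
            rw [List.append_nil] at hstack
            conv_rhs => rw [hq]
            rw [hstack, pvRunB_nil]
            simp [pvOutG]
          | cons x post =>
            have hx : x = c := by
              have := List.head?_dropWhile_not (p := fun x => x ≠ c) (l := q)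
              rw [hdrop] at this
              simpa using this
            subst hx
            simp only [if_pos rfl]
            have hq : q = q.takeWhile (fun y => y ≠ x) ++ x :: post := by
              conv_lhs => rw [← hsplit]
              rw [hdrop]
            have hrun : pvRunB q (w, x :: ts2)
                = pvRunB (x :: post) ((q.takeWhile (fun y => y ≠ x)).reverse ++ w, x :: ts2) := by
              conv_lhs => rw [hq]
              exact pvRunB_stack _ _ w x ts2 htake
            rw [hrun, pvRunB_cons]
            show pvLoopA ts2 post ((q.takeWhile (fun y => y ≠ x)).reverse ++ w)
              = pvOutG (pvRunB post (pvPopB (x :: (q.takeWhile (fun y => y ≠ x)).reverse ++ w) (x :: ts2)))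
            rw [show (x :: (q.takeWhile (fun y => y ≠ x)).reverse ++ w) = x :: ((q.takeWhile (fun y => y ≠ x)).reverse ++ w) from rfl]
            rw [pvPopB_cons_eq]
            have hlq : q.length = (q.takeWhile (fun y => y ≠ x)).length + post.length + 1 := by
              conv_lhs => rw [hq]
              simp
              omega
            exact ih ts2 post _ (by omega) hc.1 (by simp only [List.length_append, List.length_reverse]; omega)
-- the normalised target strings of a pairwise-sorted pair list with dash-free alphas are grouped
theorem pvConsec_map : ∀ l : List (String × Int), l.Pairwise pvPLe →
    (∀ p ∈ l, '-' ∉ p.1.toList) →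
    pvConsec (l.map (fun p => p.1 ++ "-" ++ PySem.Int.toStr p.2)) := by
  intro l
  induction l with
  | nil => intro _ _; trivial
  | cons p t ih =>
    intro hp hd
    rw [List.pairwise_cons] at hp
    refine ⟨ih hp.2 (fun q hq => hd q (List.mem_cons_of_mem _ hq)), ?_⟩
    intro hmem
    simp only [List.mem_map] at hmem
    obtain ⟨q, hq, hnq⟩ := hmem
    have hqp : q = p := by
      obtain ⟨h1, h2⟩ := pvNorm_inj (hd q (List.mem_cons_of_mem _ hq))
        (hd p List.mem_cons_self) hnq
      exact Prod.ext h1 h2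
    rw [hqp] at hq
    cases t with
    | nil => simp at hq
    | cons q1 t' =>
      have hle1 : pvPLe p q1 := hp.1 q1 List.mem_cons_self
      have hq1p : q1 = p := by
        rcases List.mem_cons.mp hq with hq' | hq'
        · exact hq'.symm
        · rw [List.pairwise_cons] at hp
          exact pvPLe_antisymm (hp.2.1 p hq') hle1
      rw [hq1p]
      simp

-- the two ports build the same flattened input and the same target list
theorem pvSlines_eq (N : Int) (lines : List (List String)) :
    pvSlinesA N lines = pvSlinesB N lines := by
  unfold pvSlinesA pvSlinesB
  rw [PySem.List.foldl_append_singleton_eq_map]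
  rfl

theorem pvSlinesB_consec (N : Int) (lines : List (List String)) :
    pvConsec (pvSlinesB N lines) := by
  unfold pvSlinesB
  apply pvConsec_map
  · exact pvSorted2_pairwise _
  · intro p hpmem
    have hperm := PySem.List.sorted2_perm
      (xs := (pvFlatA N lines).map (fun line =>
        (PySem.List.pyGetD ((PySem.Str.split? line "-").getD []) 0 "",
         (PySem.Int.ofStr? (PySem.List.pyGetD ((PySem.Str.split? line "-").getD []) 1 "")).getD 0)))
      (k1 := fun p => p.1) (k2 := fun p => p.2) (rev := false)
    have hpmem' := hperm.mem_iff.mp hpmem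
    simp only [List.mem_map] at hpmem'
    obtain ⟨line, _, rfl⟩ := hpmem'
    simp only []
    -- p.1 = parts[0] (or "" when parts is empty): dash-free either way
    rw [PySem.List.pyGetD_zero]
    cases hparts : (PySem.Str.split? line "-").getD [] with
    | nil => simp
    | cons p0 ps =>
      have := pvSplit_dashfree line p0 (by rw [hparts]; exact List.mem_cons_self)
      simpa using this

theorem pvSlinesB_length (N : Int) (lines : List (List String)) :
    (pvSlinesB N lines).length = (pvFlatA N lines).length := by
  unfold pvSlinesB
  rw [List.length_map]
  rw [(PySem.List.sorted2_perm _ _ _ _).length_eq]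
  rw [List.length_map]

-- ===== VERDICT (by name: the statement is the Claim_ definition above) =====
theorem solution_spec : Claim_equal_solution := by
  intro N lines _ _
  unfold Spec_solution solution solution_alt
  rw [pvSlines_eq]
  rw [pvMainC (pvSlinesB N lines).length _ _ _ le_rfl (pvSlinesB_consec N lines)
    (by rw [pvSlinesB_length]; simp)]
  rw [pvPopB_nil_left]
  rfl
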